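-- pv_equiv track=rewrite | github.com/fangyunqing/task | core/api/baidu/util/util7.py | algorithm4
-- ===== SOURCE A (Python) =====
-- def algorithm4(d: str, c: int):
--     res = []
--     var2 = None
--     for idx in range(0, len(d)):
--         var1 = ord(d[idx])
--         if 57344 < var1 < 55295:
--             if not var2:
--                 if var1 > 56319:
--                     c -= 3
--                     if c > -1:
--                         res.append(239)
--                         res.append(191)
--                         res.append(189)
--                     continue
--                 if idx + 1 == len(d):
--                     c -= 3
--                     if c > -1:
--                         res.append(239)
--                         res.append(191)
--                         res.append(189)
--                     continue
--                 var2 = var1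
--                 continue
--         else:
--             if var2:
--                 c -= 3
--                 if c > -1:
--                     res.append(239)
--                     res.append(191)
--                     res.append(189)
--         var2 = None
--         if var1 < 128:
--             c -= 1
--             if c < 0:
--                 break
--             res.append(var1)
--         elif var1 < 2048:
--             c -= 2
--             if c < 0:
--                 break
--             res.append(var1 >> 6 | 192)
--             res.append(63 & var1 | 128)
--         elif var1 < 65536:
--             c -= 3
--             if c < 0:
--                 break
--             res.append(var1 >> 12 | 224)
--             res.append(var1 >> 6 & 63 | 128)
--             res.append(63 & var1 | 128)
--         else:
--             c -= 4
--             if c < 0: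
--                 break
--             res.append(var1 >> 18 | 240)
--             res.append(var1 >> 12 & 63 | 128)
--             res.append(var1 >> 6 & 63 | 128)
--             res.append(63 & var1 | 128)
--     return res
-- ===== SOURCE B (Python) =====
-- def algorithm4(d: str, c: int):
--     # On the claimed domain (printable ASCII plus tab/newline/CR) each character
--     # encodes to exactly one UTF-8 byte, so the byte budget c simply truncates
--     # the string: closed-form slice instead of A's budget-mutating loop.
--     return [ord(ch) for ch in d[:max(c, 0)]]
-- ===== Notes on version B (the rewrite author's own statement) =====
-- stated objective: simpler
-- what changed: A's per-character budget-decrementing loop with bit-twiddling byte emission (and a dead surrogate branch) is replaced by a closed form: on the claimed ASCII domain every character is one UTF-8 byte, so the result is just the character codes of the first max(c,0) characters, obtained by a single slice.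
import Mathlib
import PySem

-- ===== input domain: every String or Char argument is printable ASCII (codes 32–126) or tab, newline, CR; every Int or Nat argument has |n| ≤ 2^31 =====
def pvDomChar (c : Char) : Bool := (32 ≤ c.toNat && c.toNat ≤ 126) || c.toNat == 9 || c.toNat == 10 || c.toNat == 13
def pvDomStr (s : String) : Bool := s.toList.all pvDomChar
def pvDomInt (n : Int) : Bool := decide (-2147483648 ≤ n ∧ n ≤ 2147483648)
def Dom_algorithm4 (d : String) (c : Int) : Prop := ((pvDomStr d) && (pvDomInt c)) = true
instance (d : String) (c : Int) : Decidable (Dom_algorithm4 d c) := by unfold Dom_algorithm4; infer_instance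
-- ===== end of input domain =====

-- B replaces A's per-character budget loop by a closed-form truncation: on the claimed
-- ASCII domain each character is one UTF-8 byte, so the answer is the codes of the first
-- max(c,0) characters (objective: simpler).


-- ===== PORT A =====
-- literal transliteration of A's loop: state is (idx, var2, c, res); `continue` is a tail
-- call, `break` returns res; the shared encode tail is the local `enc` (inl = break).
def a4Go (s : List Char) (idx : Nat) (n : Nat) (var2 : Option Nat) (c : Int) (res : List Int) : List Int :=
  match s with
  | [] => res
  | ch :: rest =>
    let var1 : Nat := ch.toNat
    -- shared tail of the loop body: `var2 = None` + the 4-way encode with possible break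
    let enc : Int → List Int → (List Int ⊕ (Int × List Int)) := fun c res =>
      if var1 < 128 then
        let c := c - 1
        if c < 0 then .inl res
        else .inr (c, res ++ [(var1 : Int)])
      else if var1 < 2048 then
        let c := c - 2
        if c < 0 then .inl res
        else .inr (c, res ++ [((var1 >>> 6 ||| 192 : Nat) : Int), ((63 &&& var1 ||| 128 : Nat) : Int)])
      else if var1 < 65536 then
        let c := c - 3
        if c < 0 then .inl res
        else .inr (c, res ++ [((var1 >>> 12 ||| 224 : Nat) : Int),
                              ((var1 >>> 6 &&& 63 ||| 128 : Nat) : Int),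
                              ((63 &&& var1 ||| 128 : Nat) : Int)])
      else
        let c := c - 4
        if c < 0 then .inl res
        else .inr (c, res ++ [((var1 >>> 18 ||| 240 : Nat) : Int),
                              ((var1 >>> 12 &&& 63 ||| 128 : Nat) : Int),
                              ((var1 >>> 6 &&& 63 ||| 128 : Nat) : Int),
                              ((63 &&& var1 ||| 128 : Nat) : Int)])
    if 57344 < var1 ∧ var1 < 55295 then
      if (match var2 with | none => true | some v => v == 0) = true then  -- `if not var2`
        if var1 > 56319 then
          let c := c - 3
          let res := if c > -1 then res ++ [239, 191, 189] else res
          a4Go rest (idx + 1) n var2 c res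
        else if idx + 1 = n then
          let c := c - 3
          let res := if c > -1 then res ++ [239, 191, 189] else res
          a4Go rest (idx + 1) n var2 c res
        else
          a4Go rest (idx + 1) n (some var1) c res
      else
        -- fall through past the inner `if` to `var2 = None` and the encode
        match enc c res with
        | .inl r => r
        | .inr (c, res) => a4Go rest (idx + 1) n none c res
    else
      let cr : Int × List Int :=
        if (match var2 with | none => false | some v => v != 0) = true then  -- `if var2`
          let c := c - 3
          (c, if c > -1 then res ++ [239, 191, 189] else res)
        else (c, res)
      match enc cr.1 cr.2 with
      | .inl r => r
      | .inr (c, res) => a4Go rest (idx + 1) n none c res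

def algorithm4 (d : String) (c : Int) : List Int :=
  a4Go d.toList 0 d.length none c []

-- ===== PORT B =====
-- Source B: return [ord(ch) for ch in d[:max(c, 0)]]
def algorithm4_alt (d : String) (c : Int) : List Int :=
  (d.toList.take (max c 0).toNat).map (fun ch => (ch.toNat : Int))

-- ===== PRECONDITION & SPEC =====
def Spec_algorithm4 (d : String) (c : Int) (out : List Int) : Prop := out = algorithm4_alt d c
instance (d : String) (c : Int) (out : List Int) : Decidable (Spec_algorithm4 d c out) := by unfold Spec_algorithm4; infer_instance

-- ===== CLAIM (what is proved, stated in full; the proofs are below) =====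
def Claim_equal_algorithm4 : Prop := ∀ (d : String) (c : Int), Dom_algorithm4 d c → Spec_algorithm4 d c (algorithm4 d c)

-- ===== LEMMAS AND PROOFS =====

-- loop invariant: for ASCII input (all codes < 128) and var2 = none, the loop appends
-- exactly the codes of the first max(c,0) characters.
theorem a4Go_ascii (s : List Char) (idx n : Nat) (c : Int) (res : List Int)
    (h : ∀ ch ∈ s, ch.toNat < 128) :
    a4Go s idx n none c res
      = res ++ (s.take (max c 0).toNat).map (fun ch => (ch.toNat : Int)) := by
  induction s generalizing idx c res with
  | nil => simp [a4Go]
  | cons ch rest ih =>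
    have hch : ch.toNat < 128 := h ch (by simp)
    have hrest : ∀ x ∈ rest, x.toNat < 128 := fun x hx => h x (by simp [hx])
    have hcond : ¬ (57344 < ch.toNat ∧ ch.toNat < 55295) := by omega
    by_cases hc : c - 1 < 0
    · have h0 : (max c 0).toNat = 0 := by omega
      simp [a4Go, hcond, hch, hc, h0]
    · have h1 : (max c 0).toNat = (max (c - 1) 0).toNat + 1 := by omega
      simp only [a4Go, hcond, hch, hc, if_false, if_true, Bool.false_eq_true]
      rw [ih (idx + 1) (c - 1) (res ++ [(ch.toNat : Int)]) hrest]
      simp [h1, List.append_assoc]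

-- ===== VERDICT (by name: the statement is the Claim_ definition above) =====
theorem algorithm4_spec : Claim_equal_algorithm4 := by
  intro d c hdom
  have hall : ∀ ch ∈ d.toList, ch.toNat < 128 := by
    intro ch hch
    have : pvDomStr d = true := by
      unfold Dom_algorithm4 at hdom
      exact (Bool.and_eq_true _ _ |>.mp hdom).1
    have := List.all_eq_true.mp this ch hch
    simp [pvDomChar] at this
    omega
  show algorithm4 d c = algorithm4_alt d c
  unfold algorithm4 algorithm4_alt
  simpa using a4Go_ascii d.toList 0 d.length c [] hall
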